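-- pv_equiv track=rewrite | github.com/Landen-Master/SalesLoft_LinkedIn_Scraper | scraping_methods.py | GenericCompanyNames
-- ===== SOURCE A (Python) =====
-- def GenericCompanyNames(userCompany, postedCompany):
--
--     suffixes = ["LLC", "Co", "Inc", "Agency", "Assn", "Assoc", "BV", "Comp", "Corp", "DMD", "Gmbh", "Group", "Intl", "LP", "LTD", "MFG", "PA", "PC", "PLC", "PLLC", "SA", "Svcs"] #list of generic company suffixes
--     prefixes = ["The", "Dr"] #list of generic company prefixes
--
--     found = False #loop break variable and return variable
--     i = 0 #loop increment variable
--     tempCompany = "" #temporary string to compare to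
--
--
--     comma = userCompany.find(',')
--     if (comma != -1):
--         userCompany = userCompany[:comma]
--
--     #Goes through a list of generic suffixes to see if any of them cause match the one on the current page
--     while i < suffixes.__len__() - 1 and found == False:
--
--         tempCompany = userCompany + " " + suffixes[i] #temporary name
--
--         #if the company name matches with the temporary name, updates company name and breaks loop
--         if postedCompany == tempCompany:
--             userCompany = tempCompany
--             found = True
--
--         #if the company name does not match, moves to the next suffix
--         else:
--             i = i + 1
--
--     i = 0 #reset loop variable
--
--     #Goes through a list of generic prefixes to see if any of them cause match the one on the current page
--     while i < prefixes.__len__() and found == False: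
--
--         tempCompany =  prefixes[i] + " " + userCompany #temporary company name
--
--          #if the company name matches with the temporary name, updates company name and breaks loop
--         if postedCompany == tempCompany:
--             found = True
--
--         #if the company name does not match, moves to the next suffix
--         else:
--             i = i + 1
--
--     #if the company name has still not been found, checks to see if the name on the page contains the original company name, and if it does, updates it to the company on the page
--     tempPosted = postedCompany.lower()
--     tempCompany = userCompany.lower()
--     if found == False and ((tempCompany in tempPosted) or (tempPosted in tempCompany)):
--         found = True
--         userCompany = postedCompany #updates page name
--
--     return userCompany #returns if the company name has updated
-- ===== SOURCE B (Python) =====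
-- # Different structure: instead of generating 23 candidate strings and comparing each,
-- # B PARSES postedCompany: it splits it at its last space (rpartition) and classifies the
-- # tail against a suffix set, then at its first space (partition) and classifies the head
-- # against the prefixes.  "Svcs" is absent from the suffix set because A's loop bound
-- # len-1 never reaches it.
-- _SUFFIXES = {"LLC", "Co", "Inc", "Agency", "Assn", "Assoc", "BV", "Comp", "Corp",
--              "DMD", "Gmbh", "Group", "Intl", "LP", "LTD", "MFG", "PA", "PC", "PLC",
--              "PLLC", "SA"}
--
-- def GenericCompanyNames(userCompany, postedCompany):
--     comma = userCompany.find(',')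
--     if comma != -1:
--         userCompany = userCompany[:comma]
--     # suffix rule: postedCompany = userCompany + " " + <known suffix>  -> keep posted form
--     head, sep, tail = postedCompany.rpartition(' ')
--     if sep and head == userCompany and tail in _SUFFIXES:
--         return postedCompany
--     # prefix rule: postedCompany = <known prefix> + " " + userCompany  -> keep user form
--     head, sep, tail = postedCompany.partition(' ')
--     if sep and (head == "The" or head == "Dr") and tail == userCompany:
--         return userCompany
--     # fallback: case-insensitive containment either way -> adopt posted form
--     u, p = userCompany.lower(), postedCompany.lower()
--     return postedCompany if (u in p or p in u) else userCompany
-- ===== Notes on version B (the rewrite author's own statement) =====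
-- stated objective: alternative
-- what changed: A generates all 23 candidate strings (userCompany+suffix, prefix+userCompany) in two while loops and compares postedCompany with each; B never builds candidates: it parses postedCompany once, splitting at its last space (rpartition) to classify the tail against a suffix set, then at its first space (partition) to classify the head against the prefixes; A's len-1 loop bound that skips 'Svcs' becomes its explicit absence from the suffix set.
import Mathlib
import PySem

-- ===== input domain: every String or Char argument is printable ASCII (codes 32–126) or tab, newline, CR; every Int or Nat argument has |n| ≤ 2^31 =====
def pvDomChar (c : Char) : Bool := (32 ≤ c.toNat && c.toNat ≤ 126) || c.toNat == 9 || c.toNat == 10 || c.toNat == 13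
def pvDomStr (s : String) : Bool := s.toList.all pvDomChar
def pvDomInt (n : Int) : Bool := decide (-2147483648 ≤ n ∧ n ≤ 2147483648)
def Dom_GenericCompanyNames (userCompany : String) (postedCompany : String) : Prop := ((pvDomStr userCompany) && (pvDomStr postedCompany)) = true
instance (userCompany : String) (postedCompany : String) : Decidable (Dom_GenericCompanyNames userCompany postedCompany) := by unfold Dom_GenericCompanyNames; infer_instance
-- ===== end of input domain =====

-- B parses postedCompany (split at its last / first space) instead of generating the 23
-- candidate strings A's two while loops build and compare; equal return value (objective: simpler).

-- ===== PORT A =====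
def pvSuffixesA : List String := ["LLC", "Co", "Inc", "Agency", "Assn", "Assoc", "BV", "Comp", "Corp", "DMD", "Gmbh", "Group", "Intl", "LP", "LTD", "MFG", "PA", "PC", "PLC", "PLLC", "SA", "Svcs"]
def pvPrefixesA : List String := ["The", "Dr"]

-- A's first while loop: i walks the first len-1 suffixes until a match (found flag + updated name)
def pvSufLoopA (u p : String) : List String → Bool × String
  | [] => (false, u)
  | s :: rest =>
    let temp := u ++ " " ++ s
    if p == temp then (true, temp) else pvSufLoopA u p rest

-- A's second while loop: i walks the prefixes until a match (found flag; name unchanged)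
def pvPreLoopA (u p : String) : List String → Bool
  | [] => false
  | s :: rest => if p == s ++ " " ++ u then true else pvPreLoopA u p rest

def GenericCompanyNames (userCompany : String) (postedCompany : String) : String :=
  let comma := PySem.Str.find userCompany ","
  let u1 := if comma ≠ -1 then PySem.Str.slice userCompany none (some comma) else userCompany
  let r := pvSufLoopA u1 postedCompany (pvSuffixesA.take (pvSuffixesA.length - 1))
  if r.1 then r.2
  else if pvPreLoopA u1 postedCompany pvPrefixesA then u1
  else
    let tempPosted := PySem.Str.lower postedCompany
    let tempCompany := PySem.Str.lower u1
    if PySem.Str.isIn tempCompany tempPosted || PySem.Str.isIn tempPosted tempCompany then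
      postedCompany
    else u1

-- ===== PORT B =====
def pvSuffixSetB : List String := ["LLC", "Co", "Inc", "Agency", "Assn", "Assoc", "BV", "Comp", "Corp", "DMD", "Gmbh", "Group", "Intl", "LP", "LTD", "MFG", "PA", "PC", "PLC", "PLLC", "SA"]

-- Source B's postedCompany.partition(' ') restricted to the found case: 'some (head, tail)'
-- when a space exists ('sep' nonempty in Python), 'none' otherwise; exact for that use.
def pvPartSpace : List Char → Option (List Char × List Char)
  | [] => none
  | c :: rest =>
    if c = ' ' then some ([], rest)
    else
      match pvPartSpace rest with
      | some (h, t) => some (c :: h, t)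
      | none => none

-- Source B's postedCompany.rpartition(' ') (found case): partition of the reverse, swapped back.
def pvRPartSpace (l : List Char) : Option (List Char × List Char) :=
  match pvPartSpace l.reverse with
  | some (a, b) => some (b.reverse, a.reverse)
  | none => none

-- Source B's prefix rule + lowercase-containment fallback (the code after the suffix rule)
def pvPrefixStep (u postedCompany : String) : String :=
  match pvPartSpace postedCompany.toList with
  | some (h, t) =>
    if (String.ofList h == "The" || String.ofList h == "Dr") && t == u.toList then u
    else pvFallbackStep u postedCompany
  | none => pvFallbackStep u postedCompany
where
  pvFallbackStep (u postedCompany : String) : String :=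
    if PySem.Str.isIn (PySem.Str.lower u) (PySem.Str.lower postedCompany) ||
        PySem.Str.isIn (PySem.Str.lower postedCompany) (PySem.Str.lower u) then postedCompany
    else u

def GenericCompanyNames_alt (userCompany : String) (postedCompany : String) : String :=
  let comma := PySem.Str.find userCompany ","
  let u := if comma ≠ -1 then PySem.Str.slice userCompany none (some comma) else userCompany
  match pvRPartSpace postedCompany.toList with
  | some (h, t) =>
    if h == u.toList && pvSuffixSetB.contains (String.ofList t) then postedCompany
    else pvPrefixStep u postedCompany
  | none => pvPrefixStep u postedCompany

-- ===== PRECONDITION & SPEC =====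
def Spec_GenericCompanyNames (userCompany : String) (postedCompany : String) (out : String) : Prop := out = GenericCompanyNames_alt userCompany postedCompany
instance (userCompany : String) (postedCompany : String) (out : String) : Decidable (Spec_GenericCompanyNames userCompany postedCompany out) := by unfold Spec_GenericCompanyNames; infer_instance

-- ===== CLAIM (what is proved, stated in full; the proofs are below) =====
def Claim_equal_GenericCompanyNames : Prop := ∀ (userCompany : String) (postedCompany : String), Dom_GenericCompanyNames userCompany postedCompany → Spec_GenericCompanyNames userCompany postedCompany (GenericCompanyNames userCompany postedCompany)

-- ===== LEMMAS AND PROOFS =====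

-- pvPartSpace on a string whose head part is space-free splits exactly there
lemma pvPartSpace_append (h t : List Char) (hall : ∀ c ∈ h, c ≠ ' ') :
    pvPartSpace (h ++ ' ' :: t) = some (h, t) := by
  induction h with
  | nil => simp [pvPartSpace]
  | cons c h' ih =>
    have hc : c ≠ ' ' := hall c (by simp)
    simp only [List.cons_append, pvPartSpace, if_neg hc,
      ih (fun c hm => hall c (by simp [hm]))]

-- pvPartSpace returns a genuine split at a space
lemma pvPartSpace_some (l h t : List Char) (he : pvPartSpace l = some (h, t)) :
    l = h ++ ' ' :: t := by
  induction l generalizing h t with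
  | nil => cases he
  | cons c rest ih =>
    by_cases hc : c = ' '
    · subst hc
      simp [pvPartSpace] at he
      simp [← he.1, ← he.2]
    · simp only [pvPartSpace, if_neg hc] at he
      cases hrec : pvPartSpace rest with
      | some pr =>
        obtain ⟨h', t'⟩ := pr
        rw [hrec] at he
        simp only [Option.some.injEq, Prod.mk.injEq] at he
        rw [← he.1, ← he.2, ih h' t' hrec]
        simp
      | none => rw [hrec] at he; cases he

-- the corresponding two facts for pvRPartSpace (split at the LAST space)
lemma pvRPartSpace_append (h t : List Char) (hall : ∀ c ∈ t, c ≠ ' ') :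
    pvRPartSpace (h ++ ' ' :: t) = some (h, t) := by
  unfold pvRPartSpace
  have : (h ++ ' ' :: t).reverse = t.reverse ++ ' ' :: h.reverse := by
    simp [List.reverse_append]
  rw [this, pvPartSpace_append _ _ (fun c hm => hall c (by simpa using hm))]
  simp

lemma pvRPartSpace_some (l h t : List Char) (he : pvRPartSpace l = some (h, t)) :
    l = h ++ ' ' :: t := by
  unfold pvRPartSpace at he
  cases hrec : pvPartSpace l.reverse with
  | some pr =>
    obtain ⟨a, b⟩ := pr
    rw [hrec] at he
    simp only [Option.some.injEq, Prod.mk.injEq] at he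
    have hl := pvPartSpace_some _ _ _ hrec
    have : l = b.reverse ++ ' ' :: a.reverse := by
      have := congrArg List.reverse hl
      simpa [List.reverse_append] using this
    rw [this, he.1, he.2]
  | none => rw [hrec] at he; cases he

-- p equals "u s" for some listed suffix s exactly when B's rpartition test fires
lemma pv_suf_match (u p : String) :
    (pvSuffixSetB.any fun s => p == u ++ " " ++ s) =
      (match pvRPartSpace p.toList with
       | some (h, t) => h == u.toList && pvSuffixSetB.contains (String.ofList t)
       | none => false) := by
  rw [Bool.eq_iff_iff]
  simp only [List.any_eq_true, beq_iff_eq]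
  constructor
  · rintro ⟨s, hs, rfl⟩
    have hfree : ∀ c ∈ s.toList, c ≠ ' ' := by
      have : pvSuffixSetB.all (fun s => s.toList.all (· ≠ ' ')) = true := by decide
      rw [List.all_eq_true] at this
      have := this s hs
      rw [List.all_eq_true] at this
      intro c hc; simpa using this c hc
    have htl : (u ++ " " ++ s).toList = u.toList ++ ' ' :: s.toList := by simp
    rw [htl, pvRPartSpace_append _ _ hfree]
    simp only [beq_self_eq_true, Bool.true_and]
    rw [List.contains_iff_exists_mem_beq]
    exact ⟨s, hs, by simp⟩
  · intro hm
    cases hrec : pvRPartSpace p.toList with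
    | some pr =>
      obtain ⟨h, t⟩ := pr
      rw [hrec] at hm
      simp only [Bool.and_eq_true, beq_iff_eq] at hm
      obtain ⟨rfl, hcont⟩ := hm
      rw [List.contains_iff_exists_mem_beq] at hcont
      obtain ⟨s, hs, hst⟩ := hcont
      rw [beq_iff_eq] at hst
      refine ⟨s, hs, ?_⟩
      apply String.toList_inj.mp
      rw [pvRPartSpace_some _ _ _ hrec]
      have : t = s.toList := by
        have := congrArg String.toList hst
        simpa using this
      simp [this]
    | none => rw [hrec] at hm; cases hm

-- p equals "pre u" for a listed prefix exactly when B's partition test fires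
lemma pv_pre_match (u p : String) :
    (p == "The " ++ u || p == "Dr " ++ u) =
      (match pvPartSpace p.toList with
       | some (h, t) => (String.ofList h == "The" || String.ofList h == "Dr") && t == u.toList
       | none => false) := by
  rw [Bool.eq_iff_iff]
  simp only [Bool.or_eq_true, beq_iff_eq]
  constructor
  · rintro (rfl | rfl)
    · have hThe : ∀ c ∈ ['T','h','e'], c ≠ ' ' := by
        have hb : (['T','h','e'].all (· ≠ ' ')) = true := by decide
        rw [List.all_eq_true] at hb
        intro c hc; simpa using hb c hc
      have : ("The " ++ u).toList = ['T','h','e'] ++ ' ' :: u.toList := by simp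
      rw [this, pvPartSpace_append _ _ hThe]
      simp
    · have hDr : ∀ c ∈ ['D','r'], c ≠ ' ' := by
        have hb : (['D','r'].all (· ≠ ' ')) = true := by decide
        rw [List.all_eq_true] at hb
        intro c hc; simpa using hb c hc
      have : ("Dr " ++ u).toList = ['D','r'] ++ ' ' :: u.toList := by simp
      rw [this, pvPartSpace_append _ _ hDr]
      simp
  · intro hm
    cases hrec : pvPartSpace p.toList with
    | some pr =>
      obtain ⟨h, t⟩ := pr
      rw [hrec] at hm
      simp only [Bool.and_eq_true, Bool.or_eq_true, beq_iff_eq] at hm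
      obtain ⟨hh, rfl⟩ := hm
      have hp := pvPartSpace_some _ _ _ hrec
      rcases hh with hh | hh
      · left
        apply String.toList_inj.mp
        have hhl : h = ['T','h','e'] := by
          have := congrArg String.toList hh
          rw [String.toList_ofList] at this
          exact this.trans (by decide)
        rw [hp, hhl]; simp
      · right
        apply String.toList_inj.mp
        have hhl : h = ['D','r'] := by
          have := congrArg String.toList hh
          rw [String.toList_ofList] at this
          exact this.trans (by decide)
        rw [hp, hhl]; simp
    | none => rw [hrec] at hm; cases hm

-- A's suffix loop returns (true, p) iff some listed suffix matches, else (false, u)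
lemma pv_sufLoopA_eq (u p : String) (l : List String) :
    pvSufLoopA u p l = if l.any (fun s => p == u ++ " " ++ s) then (true, p) else (false, u) := by
  induction l with
  | nil => simp [pvSufLoopA]
  | cons s rest ih =>
    by_cases h : p = u ++ " " ++ s
    · simp [pvSufLoopA, h]
    · simp [pvSufLoopA, h, ih]

-- A's prefix loop unrolled on its two-element list
lemma pv_preLoopA_eq (u p : String) :
    pvPreLoopA u p pvPrefixesA = (p == "The " ++ u || p == "Dr " ++ u) := by
  have h1 : "The" ++ " " ++ u = "The " ++ u := by
    apply String.toList_inj.mp; simp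
  have h2 : "Dr" ++ " " ++ u = "Dr " ++ u := by
    apply String.toList_inj.mp; simp
  simp only [pvPrefixesA, pvPreLoopA, h1, h2]
  by_cases hp1 : p = "The " ++ u <;> by_cases hp2 : p = "Dr " ++ u <;> simp [hp1, hp2]

-- ===== VERDICT (by name: the statement is the Claim_ definition above) =====
theorem GenericCompanyNames_spec : Claim_equal_GenericCompanyNames := by
  intro userCompany postedCompany _
  unfold Spec_GenericCompanyNames GenericCompanyNames GenericCompanyNames_alt
  simp only []
  generalize (if PySem.Str.find userCompany "," ≠ -1 then PySem.Str.slice userCompany none (some (PySem.Str.find userCompany ",")) else userCompany) = u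
  rw [show pvSuffixesA.take (pvSuffixesA.length - 1) = pvSuffixSetB from rfl,
    pv_sufLoopA_eq, pv_preLoopA_eq, pv_suf_match, pv_pre_match]
  unfold pvPrefixStep pvPrefixStep.pvFallbackStep
  cases hr : pvRPartSpace postedCompany.toList with
  | some pr =>
    obtain ⟨h, t⟩ := pr
    by_cases hc : h = u.toList ∧ String.ofList t ∈ pvSuffixSetB
    · simp [hc]
    · cases hp : pvPartSpace postedCompany.toList with
      | some pr2 =>
        obtain ⟨h2, t2⟩ := pr2
        by_cases hc2 : (String.ofList h2 = "The" ∨ String.ofList h2 = "Dr") ∧ t2 = u.toList <;>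
          simp [hc, hc2]
      | none => simp [hc]
  | none =>
    cases hp : pvPartSpace postedCompany.toList with
    | some pr2 =>
      obtain ⟨h2, t2⟩ := pr2
      by_cases hc2 : (String.ofList h2 = "The" ∨ String.ofList h2 = "Dr") ∧ t2 = u.toList <;>
        simp [hc2]
    | none => simp
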